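-- pv_equiv track=rewrite | github.com/chai0204/analysis-in-python | CS Algorithm in python/src/temp.py | get_v_structure_tuples
-- ===== SOURCE A (Python) =====
-- from itertools import combinations
-- from collections import defaultdict
--
-- def get_v_structure_tuples(directed_edges: set):
--     """V構造の有向辺セットを、可読な(X, Y, Z)のタプルセットに変換する"""
--     colliders = defaultdict(list)
--     for u, v in directed_edges: colliders[v].append(u)
--     v_structures = set()
--     for z, parents in colliders.items():
--         if len(parents) >= 2:
--             for x, y in combinations(parents, 2):
--                 v_structures.add(tuple(sorted((x,y))) + (z,))
--     return v_structures
-- ===== SOURCE B (Python) =====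
-- from itertools import combinations
--
-- def get_v_structure_tuples(directed_edges: set):
--     """V構造の有向辺セットを、可読な(X, Y, Z)のタプルセットに変換する"""
--     v_structures = set()
--     for (u1, v1), (u2, v2) in combinations(directed_edges, 2):
--         if v1 == v2:
--             v_structures.add((u1, u2, v1) if u1 <= u2 else (u2, u1, v1))
--     return v_structures
-- ===== Notes on version B (the rewrite author's own statement) =====
-- stated objective: alternative
-- what changed: Drops the defaultdict target->parents grouping entirely: B scans all unordered pairs of edges with itertools.combinations(directed_edges, 2) and emits a v-structure whenever the two edges share their target, trading A's O(E+P) grouped enumeration for a direct O(E^2) pair scan with no index structure.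
import Mathlib
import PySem

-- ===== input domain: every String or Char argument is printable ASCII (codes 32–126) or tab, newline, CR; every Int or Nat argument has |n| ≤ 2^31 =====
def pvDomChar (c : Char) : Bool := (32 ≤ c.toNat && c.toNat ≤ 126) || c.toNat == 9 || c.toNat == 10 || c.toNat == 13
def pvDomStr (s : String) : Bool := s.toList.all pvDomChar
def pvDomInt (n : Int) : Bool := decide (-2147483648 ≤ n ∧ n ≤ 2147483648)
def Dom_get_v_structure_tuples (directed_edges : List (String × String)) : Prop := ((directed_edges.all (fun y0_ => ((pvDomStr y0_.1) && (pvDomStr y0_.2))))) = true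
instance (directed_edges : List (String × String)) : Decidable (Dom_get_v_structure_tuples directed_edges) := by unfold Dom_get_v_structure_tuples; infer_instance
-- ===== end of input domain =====

-- B drops A's defaultdict target->parents grouping entirely and scans the unordered PAIRS of
-- edges directly (itertools.combinations(directed_edges, 2)), adding a v-structure whenever the
-- two edges share their target (objective: alternative; B trades A's O(E+P) grouping for an
-- O(E^2) pair scan with no index structure). Both Pythons RETURN A SET, whose iteration order is
-- unspecified (hash order), so both ports return the set's canonical representative: its
-- elements sorted lexicographically (pvCanon); the differential tester compares sets ignoring
-- order, and the proof shows the two sets have the same elements.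

-- canonical representative of a set of (String, String, String) triples: sort lexicographically
def pvKey (t : String × String × String) : Lex (String × Lex (String × String)) :=
  toLex (t.1, toLex (t.2.1, t.2.2))

def pvLe (a b : String × String × String) : Bool := decide (pvKey a ≤ pvKey b)

def pvCanon (l : List (String × String × String)) : List (String × String × String) :=
  @List.insertionSort _ (fun a b => pvLe a b = true) (fun a b => (pvLe a b).decEq true) l

-- ===== PORT A =====
def get_v_structure_tuples (directed_edges : List (String × String)) : List (String × String × String) :=
  -- colliders = defaultdict(list); for u, v in directed_edges: colliders[v].append(u)
  -- for z, parents in colliders.items(): if len(parents) >= 2: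
  --   for x, y in combinations(parents, 2): v_structures.add(tuple(sorted((x,y))) + (z,))
  pvCanon
    ((directed_edges.foldl (fun d uv => d.modify uv.2 [] (fun l => l ++ [uv.1]))
        (PySem.Dict.empty : PySem.Dict String (List String))).items.foldl (fun vs zp =>
      if zp.2.length ≥ 2 then
        (PySem.List.combinations zp.2 2).foldl (fun vs c =>
          match PySem.List.sorted c (fun a => a) false with
          | [x, y] => PySem.Set.add vs (x, y, zp.1)
          | _ => vs) vs
      else vs) [])

-- ===== PORT B =====
def get_v_structure_tuples_alt (directed_edges : List (String × String)) : List (String × String × String) :=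
  -- for (u1, v1), (u2, v2) in combinations(directed_edges, 2):
  --   if v1 == v2: v_structures.add((u1, u2, v1) if u1 <= u2 else (u2, u1, v1))
  pvCanon
    ((PySem.List.combinations directed_edges 2).foldl (fun vs c =>
      match c.head?, c.tail.head? with
      | some e1, some e2 =>
          if e1.2 == e2.2 then
            PySem.Set.add vs (if e1.1 ≤ e2.1 then (e1.1, e2.1, e1.2) else (e2.1, e1.1, e1.2))
          else vs
      | _, _ => vs) [])

-- ===== PRECONDITION & SPEC =====
def Spec_get_v_structure_tuples (directed_edges : List (String × String)) (out : List (String × String × String)) : Prop := out = get_v_structure_tuples_alt directed_edges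
instance (directed_edges : List (String × String)) (out : List (String × String × String)) : Decidable (Spec_get_v_structure_tuples directed_edges out) := by unfold Spec_get_v_structure_tuples; infer_instance

-- ===== CLAIM (what is proved, stated in full; the proofs are below) =====
def Claim_equal_get_v_structure_tuples : Prop := ∀ (directed_edges : List (String × String)), Dom_get_v_structure_tuples directed_edges → Spec_get_v_structure_tuples directed_edges (get_v_structure_tuples directed_edges)

-- ===== LEMMAS AND PROOFS =====

-- helpers about the canonical sort -----------------------------------------

theorem pvKey_inj (a b : String × String × String) (h : pvKey a = pvKey b) : a = b := by
  unfold pvKey at h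
  have h1 := toLex.injective h
  have h2 : a.1 = b.1 := congrArg Prod.fst h1
  have h3 := toLex.injective (congrArg Prod.snd h1)
  have h4 : a.2.1 = b.2.1 := congrArg Prod.fst h3
  have h5 : a.2.2 = b.2.2 := congrArg Prod.snd h3
  exact Prod.ext h2 (Prod.ext h4 h5)

theorem pvCanon_perm (l : List (String × String × String)) : (pvCanon l).Perm l := by
  unfold pvCanon
  exact List.perm_insertionSort _ _

theorem pvCanon_pairwise (l : List (String × String × String)) :
    (pvCanon l).Pairwise (fun a b => pvLe a b = true) := by
  unfold pvCanon
  haveI : Std.Total (fun a b => pvLe a b = true) := ⟨by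
    intro a b
    rcases le_total (pvKey a) (pvKey b) with h | h
    · exact Or.inl (by simp [pvLe, h])
    · exact Or.inr (by simp [pvLe, h])⟩
  haveI : IsTrans (String × String × String) (fun a b => pvLe a b = true) := ⟨by
    intro a b c hab hbc
    simp only [pvLe, decide_eq_true_eq] at hab hbc ⊢
    exact le_trans hab hbc⟩
  exact List.pairwise_insertionSort _ _

-- sets (Nodup lists) with the same elements have the same canonical representative
theorem pvCanon_eq_of_same_mem (s t : List (String × String × String))
    (hs : s.Nodup) (ht : t.Nodup) (h : ∀ a, a ∈ s ↔ a ∈ t) : pvCanon s = pvCanon t := by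
  have hperm : s.Perm t := (List.perm_ext_iff_of_nodup hs ht).mpr h
  apply List.Perm.eq_of_pairwise (le := fun a b => pvLe a b = true)
  · intro a b _ _ hab hba
    apply pvKey_inj
    simp only [pvLe, decide_eq_true_eq] at hab hba
    exact le_antisymm hab hba
  · exact pvCanon_pairwise s
  · exact pvCanon_pairwise t
  · exact ((pvCanon_perm s).trans hperm).trans (pvCanon_perm t).symm

-- ordered pairs of elements (earlier, later) of a list ------------------------------------

def pvSibPairs {α : Type} : List α → List (α × α)
  | [] => []
  | x :: xs => (xs.map (fun y => (x, y))) ++ pvSibPairs xs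

def pvNorm (x y z : String) : String × String × String :=
  if x ≤ y then (x, y, z) else (y, x, z)

theorem pv_comb2 {α : Type} (l : List α) :
    PySem.List.combinations l 2 = (pvSibPairs l).map (fun q => [q.1, q.2]) := by
  induction l with
  | nil => simp [PySem.List.combinations_nil_succ, pvSibPairs]
  | cons x xs ih =>
      rw [show (2 : Nat) = 1 + 1 from rfl, PySem.List.combinations_cons_succ,
        PySem.List.combinations_one]
      rw [show (1 + 1 : Nat) = 2 from rfl, ih]
      simp [pvSibPairs, List.map_map, Function.comp_def]

theorem pvSibPairs_map {α β : Type} (f : α → β) (l : List α) :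
    pvSibPairs (l.map f) = (pvSibPairs l).map (Prod.map f f) := by
  induction l with
  | nil => rfl
  | cons x xs ih => simp [pvSibPairs, ih, List.map_map, Function.comp_def, Prod.map]

theorem pvSibPairs_filter {α : Type} (p : α → Bool) (l : List α) :
    pvSibPairs (l.filter p) = (pvSibPairs l).filter (fun q => p q.1 && p q.2) := by
  induction l with
  | nil => rfl
  | cons x xs ih =>
      by_cases hx : p x = true
      · simp [pvSibPairs, hx, ih, List.filter_append, List.filter_map, Function.comp_def]
      · simp only [Bool.not_eq_true] at hx
        simp [pvSibPairs, hx, ih, List.filter_append, List.filter_map, Function.comp_def]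

theorem pv_mem_sibPairs {α : Type} (l : List α) (q : α × α) (h : q ∈ pvSibPairs l) :
    q.1 ∈ l ∧ q.2 ∈ l := by
  induction l with
  | nil => simp [pvSibPairs] at h
  | cons x xs ih =>
      simp only [pvSibPairs, List.mem_append, List.mem_map] at h
      rcases h with ⟨y, hy, rfl⟩ | h
      · exact ⟨List.mem_cons_self, List.mem_cons_of_mem _ hy⟩
      · exact ⟨List.mem_cons_of_mem _ (ih h).1, List.mem_cons_of_mem _ (ih h).2⟩

-- generic facts about folds that 'update' / conditionally 'add' a PySem.Set ---------------

theorem pv_mem_foldl_update {γ : Type} (l : List γ) (g : γ → List (String × String × String))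
    (s : PySem.Set (String × String × String)) (y : String × String × String) :
    y ∈ l.foldl (fun vs z => PySem.Set.update vs (g z)) s ↔ y ∈ s ∨ ∃ z ∈ l, y ∈ g z := by
  induction l generalizing s with
  | nil => simp
  | cons z zs ih =>
      simp only [List.foldl_cons, ih, PySem.Set.mem_update, List.mem_cons]
      constructor
      · rintro ((h | h) | ⟨w, hw, hy⟩)
        · exact Or.inl h
        · exact Or.inr ⟨z, Or.inl rfl, h⟩
        · exact Or.inr ⟨w, Or.inr hw, hy⟩
      · rintro (h | ⟨w, (rfl | hw), hy⟩)
        · exact Or.inl (Or.inl h)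
        · exact Or.inl (Or.inr hy)
        · exact Or.inr ⟨w, hw, hy⟩

-- sorting a two-element string list (A's tuple(sorted((x,y))))
theorem pv_sorted_pair (x y : String) :
    PySem.List.sorted [x, y] (fun a => a) false = if x ≤ y then [x, y] else [y, x] := by
  by_cases h : x ≤ y
  · have h' : ¬ y.toList < x.toList := by
      rw [← String.lt_iff_toList_lt]; exact not_lt.mpr h
    simp [PySem.List.sorted, PySem.List.insertBy, h, h']
  · have h' : y.toList < x.toList := by
      rw [← String.lt_iff_toList_lt]; exact lt_of_not_ge h
    simp [PySem.List.sorted, PySem.List.insertBy, h, h']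

-- the grouping fold of A, keyed by the second component, as the PySem grouping shape
theorem pv_fold_swap (edges : List (String × String)) (d : PySem.Dict String (List String)) :
    edges.foldl (fun d uv => d.modify uv.2 [] (fun l => l ++ [uv.1])) d =
      (edges.map (fun uv => (uv.2, uv.1))).foldl
        (fun d p => d.modify p.1 [] (fun l => l ++ [p.2])) d := by
  induction edges generalizing d with
  | nil => rfl
  | cons e t ih => simp [List.foldl_cons, ih]

-- items of a dict with nodup keys, recovered through getD
theorem pv_items_eq (d : PySem.Dict String (List String)) (h : d.keys.Nodup) :
    d.items = d.keys.map (fun k => (k, d.getD k [])) := by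
  obtain ⟨l⟩ := d
  induction l with
  | nil => rfl
  | cons p rest ih =>
      obtain ⟨k, v⟩ := p
      simp only [PySem.Dict.keys, List.map_cons, List.nodup_cons, List.mem_map] at h
      have hhead : (PySem.Dict.mk ((k, v) :: rest)).getD k [] = v := by
        simp [PySem.Dict.getD, PySem.Dict.get?, List.find?]
      have hstep : (rest.map fun x => x.1).map
            (fun k1 => (k1, (PySem.Dict.mk ((k, v) :: rest)).getD k1 [])) =
          (rest.map fun x => x.1).map
            (fun k1 => (k1, (PySem.Dict.mk rest).getD k1 [])) := by
        apply List.map_congr_left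
        intro a ha
        rw [List.mem_map] at ha
        obtain ⟨p, hp, rfl⟩ := ha
        have hne : ¬ (k == p.1) = true := fun he => h.1 ⟨p, hp, (beq_iff_eq.mp he).symm⟩
        simp [PySem.Dict.getD, PySem.Dict.get?, List.find?, hne]
      have h2 : rest = (rest.map fun x => x.1).map
          (fun k1 => (k1, (PySem.Dict.mk rest).getD k1 [])) := by
        have := ih (by simpa [PySem.Dict.keys] using h.2)
        simpa [PySem.Dict.keys] using this
      show (k, v) :: rest =
        ((k :: rest.map fun x => x.1).map
          (fun k1 => (k1, (PySem.Dict.mk ((k, v) :: rest)).getD k1 [])))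
      rw [List.map_cons, hhead, hstep, ← h2]

-- the guarded body of A's outer loop is a set-update with the pvNorm'd sibling pairs
theorem pv_body_eq (z : String) (parents : List String)
    (vs : PySem.Set (String × String × String)) :
    (if parents.length ≥ 2 then
      (PySem.List.combinations parents 2).foldl (fun vs c =>
        match PySem.List.sorted c (fun a => a) false with
        | [x, y] => PySem.Set.add vs (x, y, z)
        | _ => vs) vs
     else vs) =
      PySem.Set.update vs ((pvSibPairs parents).map (fun q => pvNorm q.1 q.2 z)) := by
  split_ifs with h
  · rw [pv_comb2, List.foldl_map, PySem.Set.update_map_eq_foldl_add]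
    apply PySem.List.foldl_congr_mem
    intro vs' q _
    simp only [pv_sorted_pair, pvNorm]
    by_cases hq : q.1 ≤ q.2 <;> simp [hq]
  · match parents, h with
    | [], _ => simp [pvSibPairs]
    | [x], _ => simp [pvSibPairs]
    | x :: y :: t, h => simp at h

-- membership in A's set, before canonicalisation
theorem pv_mem_A (edges : List (String × String)) (y : String × String × String) :
    y ∈ ((edges.foldl (fun d uv => d.modify uv.2 [] (fun l => l ++ [uv.1]))
        (PySem.Dict.empty : PySem.Dict String (List String))).items.foldl (fun vs zp =>
      if zp.2.length ≥ 2 then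
        (PySem.List.combinations zp.2 2).foldl (fun vs c =>
          match PySem.List.sorted c (fun a => a) false with
          | [x, y] => PySem.Set.add vs (x, y, zp.1)
          | _ => vs) vs
      else vs) ([] : PySem.Set (String × String × String))) ↔
      ∃ q ∈ pvSibPairs edges, q.1.2 = q.2.2 ∧ y = pvNorm q.1.1 q.2.1 q.1.2 := by
  have hkeysnd : (edges.foldl (fun d uv => d.modify uv.2 [] (fun l => l ++ [uv.1]))
      (PySem.Dict.empty : PySem.Dict String (List String))).keys.Nodup :=
    PySem.Dict.nodup_keys_foldl_modify_key edges (fun uv => uv.2) []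
      (fun _ uv => fun l => l ++ [uv.1]) PySem.Dict.empty (by simp [PySem.Dict.keys, PySem.Dict.empty])
  have hkeys : (edges.foldl (fun d uv => d.modify uv.2 [] (fun l => l ++ [uv.1]))
      (PySem.Dict.empty : PySem.Dict String (List String))).keys =
      PySem.Set.ofList (edges.map (fun uv => uv.2)) := by
    rw [PySem.Dict.keys_foldl_modify_key edges (fun uv => uv.2) []
      (fun _ uv => fun l => l ++ [uv.1]) PySem.Dict.empty]
    have he : (PySem.Dict.empty : PySem.Dict String (List String)).keys = [] := rfl
    rw [he, PySem.Set.update_nil_left]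
  have hgetD : ∀ c : String, (edges.foldl (fun d uv => d.modify uv.2 [] (fun l => l ++ [uv.1]))
      (PySem.Dict.empty : PySem.Dict String (List String))).getD c [] =
      (edges.filter (fun uv => uv.2 == c)).map (fun uv => uv.1) := by
    intro c
    rw [pv_fold_swap, PySem.Dict.getD_foldl_modify_append]
    have he : (PySem.Dict.empty : PySem.Dict String (List String)).getD c [] = [] := rfl
    rw [he, List.filter_map, List.map_map]
    simp [Function.comp_def]
  rw [pv_items_eq _ hkeysnd, List.foldl_map]
  have hbody : ∀ (vs : PySem.Set (String × String × String)),
      (PySem.Set.ofList (edges.map (fun uv => uv.2))).foldl (fun vs z =>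
        PySem.Set.update vs ((pvSibPairs ((edges.filter (fun uv => uv.2 == z)).map
          (fun uv => uv.1))).map (fun q => pvNorm q.1 q.2 z))) vs =
      ((edges.foldl (fun d uv => d.modify uv.2 [] (fun l => l ++ [uv.1]))
        (PySem.Dict.empty : PySem.Dict String (List String))).keys).foldl (fun vs z =>
        if ((edges.foldl (fun d uv => d.modify uv.2 [] (fun l => l ++ [uv.1]))
            (PySem.Dict.empty : PySem.Dict String (List String))).getD z []).length ≥ 2 then
          (PySem.List.combinations ((edges.foldl (fun d uv => d.modify uv.2 [] (fun l => l ++ [uv.1]))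
            (PySem.Dict.empty : PySem.Dict String (List String))).getD z []) 2).foldl (fun vs c =>
            match PySem.List.sorted c (fun a => a) false with
            | [x, y] => PySem.Set.add vs (x, y, z)
            | _ => vs) vs
        else vs) vs := by
    intro vs
    rw [hkeys]
    apply PySem.List.foldl_congr_mem
    intro vs' z _
    rw [hgetD z, pv_body_eq]
  rw [← hbody []]
  rw [pv_mem_foldl_update]
  constructor
  · rintro (h | ⟨z, hz, hmem⟩)
    · simp at h
    · rcases List.mem_map.mp hmem with ⟨q, hq, rfl⟩
      rw [pvSibPairs_map, pvSibPairs_filter] at hq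
      rcases List.mem_map.mp hq with ⟨p, hp, rfl⟩
      rcases List.mem_filter.mp hp with ⟨hpmem, hpz⟩
      simp only [Bool.and_eq_true, beq_iff_eq] at hpz
      exact ⟨p, hpmem, hpz.1.trans hpz.2.symm, by simp [Prod.map, hpz.1]⟩
  · rintro ⟨q, hq, hzz, rfl⟩
    refine Or.inr ⟨q.1.2, ?_, ?_⟩
    · rw [PySem.Set.mem_ofList]
      exact List.mem_map.mpr ⟨q.1, (pv_mem_sibPairs edges q hq).1, rfl⟩
    · apply List.mem_map.mpr
      refine ⟨Prod.map Prod.fst Prod.fst q, ?_, by simp [Prod.map]⟩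
      rw [pvSibPairs_map, pvSibPairs_filter]
      exact List.mem_map.mpr ⟨q, List.mem_filter.mpr ⟨hq, by simp [hzz]⟩, rfl⟩

-- A's set is Nodup
theorem pv_nodup_A (edges : List (String × String)) :
    ((edges.foldl (fun d uv => d.modify uv.2 [] (fun l => l ++ [uv.1]))
        (PySem.Dict.empty : PySem.Dict String (List String))).items.foldl (fun vs zp =>
      if zp.2.length ≥ 2 then
        (PySem.List.combinations zp.2 2).foldl (fun vs c =>
          match PySem.List.sorted c (fun a => a) false with
          | [x, y] => PySem.Set.add vs (x, y, zp.1)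
          | _ => vs) vs
      else vs) ([] : PySem.Set (String × String × String))).Nodup := by
  have h : ∀ (its : List (String × List String)) (vs : PySem.Set (String × String × String)),
      vs.Nodup → (its.foldl (fun vs zp =>
        if zp.2.length ≥ 2 then
          (PySem.List.combinations zp.2 2).foldl (fun vs c =>
            match PySem.List.sorted c (fun a => a) false with
            | [x, y] => PySem.Set.add vs (x, y, zp.1)
            | _ => vs) vs
        else vs) vs).Nodup := by
    intro its
    induction its with
    | nil => intro vs h; exact h
    | cons zp rest ih =>
        intro vs h
        apply ih
        dsimp only
        rw [pv_body_eq zp.1 zp.2 vs]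
        exact PySem.Set.nodup_update _ _ h
  exact h _ [] List.nodup_nil

-- membership in B's set, before canonicalisation
theorem pv_mem_B (edges : List (String × String)) (y : String × String × String) :
    y ∈ ((PySem.List.combinations edges 2).foldl (fun vs c =>
      match c.head?, c.tail.head? with
      | some e1, some e2 =>
          if e1.2 == e2.2 then
            PySem.Set.add vs (if e1.1 ≤ e2.1 then (e1.1, e2.1, e1.2) else (e2.1, e1.1, e1.2))
          else vs
      | _, _ => vs) ([] : PySem.Set (String × String × String))) ↔
      ∃ q ∈ pvSibPairs edges, q.1.2 = q.2.2 ∧ y = pvNorm q.1.1 q.2.1 q.1.2 := by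
  rw [pv_comb2, List.foldl_map]
  have h : ∀ (l : List ((String × String) × (String × String)))
      (vs : PySem.Set (String × String × String)),
      y ∈ l.foldl (fun vs q =>
        if q.1.2 == q.2.2 then PySem.Set.add vs (pvNorm q.1.1 q.2.1 q.1.2) else vs) vs ↔
      y ∈ vs ∨ ∃ q ∈ l, q.1.2 = q.2.2 ∧ y = pvNorm q.1.1 q.2.1 q.1.2 := by
    intro l
    induction l with
    | nil => simp
    | cons q rest ih =>
        intro vs
        simp only [List.foldl_cons, List.mem_cons]
        by_cases hz : q.1.2 = q.2.2
        · rw [if_pos (beq_iff_eq.mpr hz), ih]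
          simp only [PySem.Set.mem_add]
          constructor
          · rintro ((h | h) | ⟨w, hw, hww⟩)
            · exact Or.inl h
            · exact Or.inr ⟨q, Or.inl rfl, hz, h⟩
            · exact Or.inr ⟨w, Or.inr hw, hww⟩
          · rintro (h | ⟨w, (rfl | hw), hww⟩)
            · exact Or.inl (Or.inl h)
            · exact Or.inl (Or.inr hww.2)
            · exact Or.inr ⟨w, hw, hww⟩
        · rw [if_neg (by simpa using hz), ih]
          constructor
          · rintro (h | ⟨w, hw, hww⟩)
            · exact Or.inl h
            · exact Or.inr ⟨w, Or.inr hw, hww⟩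
          · rintro (h | ⟨w, (rfl | hw), hww⟩)
            · exact Or.inl h
            · exact absurd hww.1 hz
            · exact Or.inr ⟨w, hw, hww⟩
  have hcongr : ∀ (vs : PySem.Set (String × String × String)),
      (pvSibPairs edges).foldl (fun vs q =>
        match [q.1, q.2].head?, [q.1, q.2].tail.head? with
        | some e1, some e2 =>
            if e1.2 == e2.2 then
              PySem.Set.add vs (if e1.1 ≤ e2.1 then (e1.1, e2.1, e1.2) else (e2.1, e1.1, e1.2))
            else vs
        | _, _ => vs) vs =
      (pvSibPairs edges).foldl (fun vs q =>
        if q.1.2 == q.2.2 then PySem.Set.add vs (pvNorm q.1.1 q.2.1 q.1.2) else vs) vs := by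
    intro vs
    apply PySem.List.foldl_congr_mem
    intro vs' q _
    simp [pvNorm]
  rw [hcongr, h]
  simp

-- B's set is Nodup
theorem pv_nodup_B (edges : List (String × String)) :
    ((PySem.List.combinations edges 2).foldl (fun vs c =>
      match c.head?, c.tail.head? with
      | some e1, some e2 =>
          if e1.2 == e2.2 then
            PySem.Set.add vs (if e1.1 ≤ e2.1 then (e1.1, e2.1, e1.2) else (e2.1, e1.1, e1.2))
          else vs
      | _, _ => vs) ([] : PySem.Set (String × String × String))).Nodup := by
  have h : ∀ (l : List (List (String × String))) (vs : PySem.Set (String × String × String)),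
      vs.Nodup → (l.foldl (fun vs c =>
        match c.head?, c.tail.head? with
        | some e1, some e2 =>
            if e1.2 == e2.2 then
              PySem.Set.add vs (if e1.1 ≤ e2.1 then (e1.1, e2.1, e1.2) else (e2.1, e1.1, e1.2))
            else vs
        | _, _ => vs) vs).Nodup := by
    intro l
    induction l with
    | nil => intro vs h; exact h
    | cons c rest ih =>
        intro vs h
        apply ih
        rcases c with _ | ⟨e1, _ | ⟨e2, t⟩⟩
        · exact h
        · exact h
        · by_cases hz : (e1.2 == e2.2) = true
          · simp only [List.head?, List.tail, hz, if_true]; exact PySem.Set.nodup_add _ _ h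
          · simp only [List.head?, List.tail, hz]; exact h
  exact h _ [] List.nodup_nil

-- ===== VERDICT (by name: the statement is the Claim_ definition above) =====
theorem get_v_structure_tuples_spec : Claim_equal_get_v_structure_tuples := by
  intro edges _
  unfold Spec_get_v_structure_tuples get_v_structure_tuples get_v_structure_tuples_alt
  apply pvCanon_eq_of_same_mem
  · exact pv_nodup_A edges
  · exact pv_nodup_B edges
  · intro y
    rw [pv_mem_A, pv_mem_B]
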